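-- pv_equiv track=rewrite | github.com/jmloewen/snippets | ctci/wordExtensions/wordExtensions.py | wordExtensions
-- ===== SOURCE A (Python) =====
-- def wordExtensions(S):
--     ctr = 0
--
--     #will have to iterate through the entire string.
--     #As we iterate through, we want to track the previous letter, as well as the current letter.
--     #if the previous letter matches the current letter, AND the next letter, we have some extension.
--     #to help with this, we can set a flag indicating whether or not we are in a extension.
--     #or, we can just do a pointer walk instead.
--     if len(S) < 3:
--         return ctr
--
--     prevprev = S[0]
--     prev = S[1]
--     i=2
--     inRep = False
--     while i < len(S):
--         cur = S[i]
--
--         #If the last 3 values match each other, we need to increase our counter, as long as we haven't counted this one already.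
--         if prevprev == prev == cur:
--             if not inRep: #If we're not already in a repetition, flip flag to indicate we now are, so we don't add the same one twice.
--                 inRep = True
--                 ctr += 1
--         else:#There is a mismatch in the values, so any existing match is now broken.  we're not in a repetition.
--             inRep = False
--
--         prevprev, prev = prev, cur
--         i += 1
--
--     return ctr
-- ===== SOURCE B (Python) =====
-- from itertools import groupby
--
-- def wordExtensions(S):
--     return sum(1 for _, g in groupby(S) if sum(1 for _ in g) >= 3)
-- ===== Notes on version B (the rewrite author's own statement) =====
-- stated objective: idiomatic
-- what changed: Replaces the explicit prevprev/prev/cur pointer walk with inRep flag by an itertools.groupby pass that partitions the string into maximal runs and counts the runs of length >= 3.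
import Mathlib
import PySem

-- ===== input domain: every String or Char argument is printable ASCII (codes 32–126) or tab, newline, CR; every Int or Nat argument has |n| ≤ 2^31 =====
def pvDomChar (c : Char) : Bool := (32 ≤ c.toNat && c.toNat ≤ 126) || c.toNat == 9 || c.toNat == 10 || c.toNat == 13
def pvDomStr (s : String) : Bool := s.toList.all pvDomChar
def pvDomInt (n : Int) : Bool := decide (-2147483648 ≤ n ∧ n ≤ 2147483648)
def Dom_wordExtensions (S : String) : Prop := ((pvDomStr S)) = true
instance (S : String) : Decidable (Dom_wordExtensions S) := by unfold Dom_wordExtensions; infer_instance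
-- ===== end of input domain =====

-- B replaces A's prevprev/prev/cur pointer walk with inRep flag by a groupby-style pass
-- over maximal runs, counting the runs of length >= 3 (objective: idiomatic).

-- ===== PORT A =====
-- A's while loop: state (prevprev, prev, inRep, ctr), walking the remaining characters.
def pvLoopA (pp p : Char) (inRep : Bool) (ctr : Int) : List Char → Int
  | [] => ctr
  | c :: rest =>
    if pp = p ∧ p = c then
      if inRep then pvLoopA p c true ctr rest
      else pvLoopA p c true (ctr + 1) rest
    else pvLoopA p c false ctr rest

def wordExtensions (S : String) : Int :=
  let l := S.toList
  if l.length < 3 then 0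
  else pvLoopA (PySem.List.pyGetD l 0 ' ') (PySem.List.pyGetD l 1 ' ') false 0 (l.drop 2)

-- ===== PORT B =====
-- itertools.groupby(S): lengths of the maximal runs of equal consecutive characters.
def pvRuns (l : List Char) : List Nat :=
  match l with
  | [] => []
  | c :: rest =>
      (1 + (rest.takeWhile (fun x => x = c)).length) :: pvRuns (rest.dropWhile (fun x => x = c))
termination_by l.length
decreasing_by
  simp only [List.length_cons]
  exact Nat.lt_succ_of_le (List.length_dropWhile_le _ _)

def wordExtensions_alt (S : String) : Int :=
  ((pvRuns S.toList).countP (fun n => decide (3 ≤ n)) : Int)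

-- ===== PRECONDITION & SPEC =====
def Spec_wordExtensions (S : String) (out : Int) : Prop := out = wordExtensions_alt S
instance (S : String) (out : Int) : Decidable (Spec_wordExtensions S out) := by unfold Spec_wordExtensions; infer_instance

-- ===== CLAIM (what is proved, stated in full; the proofs are below) =====
def Claim_equal_wordExtensions : Prop := ∀ (S : String), Dom_wordExtensions S → Spec_wordExtensions S (wordExtensions S)

-- ===== LEMMAS AND PROOFS =====

-- the Int-valued count of runs of length ≥ 3
def pvCr (l : List Char) : Int := ((pvRuns l).countP (fun n => decide (3 ≤ n)) : Int)

theorem pvCr_nil : pvCr [] = 0 := by simp [pvCr, pvRuns]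

theorem pvCr_single (a : Char) : pvCr [a] = 0 := by
  simp [pvCr, pvRuns]

theorem pvCr_pair (a b : Char) : pvCr [a, b] = 0 := by
  by_cases h : b = a <;> simp [pvCr, pvRuns, h]

-- a length-1 first run peels off
theorem pvCr_ne (c d : Char) (t : List Char) (h : c ≠ d) :
    pvCr (c :: d :: t) = pvCr (d :: t) := by
  have h' : ¬ (d = c) := fun e => h e.symm
  simp [pvCr, pvRuns, h']

-- a length-2 first run peels off
theorem pvCr_two_ne (c d : Char) (t : List Char) (h : c ≠ d) :
    pvCr (c :: c :: d :: t) = pvCr (d :: t) := by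
  have h' : ¬ (d = c) := fun e => h e.symm
  simp [pvCr, pvRuns, h']

-- a run that already has three equal characters counts exactly once
theorem pvCr_three (c : Char) (t : List Char) :
    pvCr (c :: c :: c :: t) = 1 + pvCr (t.dropWhile (fun x => x = c)) := by
  simp [pvCr, pvRuns, List.countP_cons]
  omega

-- a run with exactly two chars so far counts iff the next char extends it
theorem pvCr_two (c : Char) (t : List Char) :
    pvCr (c :: c :: t) =
      (if t.head? = some c then 1 else 0) + pvCr (t.dropWhile (fun x => x = c)) := by
  cases t with
  | nil => simp [pvCr, pvRuns]
  | cons d t' =>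
      by_cases h : d = c
      · subst h
        simp [pvCr, pvRuns, List.countP_cons]
        rw [if_pos (by omega)]
        omega
      · simp [pvCr, pvRuns, h]

-- main invariant of A's loop, for both values of the inRep flag
theorem pvLoopA_key (l : List Char) :
    (∀ pp p ctr, pvLoopA pp p false ctr l = ctr + pvCr (pp :: p :: l)) ∧
    (∀ p ctr, pvLoopA p p true ctr l =
        ctr + pvCr (p :: p :: l) - (if l.head? = some p then 1 else 0)) := by
  induction l with
  | nil =>
      constructor
      · intro pp p ctr; simp [pvLoopA, pvCr_pair]
      · intro p ctr; simp [pvLoopA, pvCr_pair]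
  | cons c rest ih =>
      constructor
      · intro pp p ctr
        by_cases h : pp = p ∧ p = c
        · obtain ⟨h1, h2⟩ := h; subst h1; subst h2
          rw [pvLoopA, if_pos ⟨rfl, rfl⟩]
          simp only [Bool.false_eq_true, if_false]
          rw [ih.2, pvCr_three, pvCr_two]
          split_ifs <;> omega
        · rw [pvLoopA, if_neg h, ih.1]
          by_cases hpp : pp = p
          · subst hpp
            have hc : pp ≠ c := fun e => h ⟨rfl, e⟩
            rw [pvCr_two_ne _ _ _ hc, pvCr_ne _ _ _ hc]
          · rw [pvCr_ne _ _ _ hpp]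
      · intro p ctr
        by_cases h : p = c
        · subst h
          rw [pvLoopA, if_pos ⟨rfl, rfl⟩]
          simp only [if_true]
          rw [ih.2, pvCr_three, pvCr_two]
          simp only [List.head?_cons]
          split_ifs <;> omega
        · rw [pvLoopA, if_neg (fun hh => h hh.2), ih.1]
          rw [pvCr_two_ne _ _ _ h, pvCr_ne _ _ _ h]
          have hcp : ¬ (c = p) := fun e => h e.symm
          simp [hcp]

-- ===== VERDICT (by name: the statement is the Claim_ definition above) =====
theorem wordExtensions_spec : Claim_equal_wordExtensions := by
  intro S _
  unfold Spec_wordExtensions wordExtensions wordExtensions_alt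
  show (if S.toList.length < 3 then 0
        else pvLoopA (PySem.List.pyGetD S.toList 0 ' ') (PySem.List.pyGetD S.toList 1 ' ')
          false 0 (S.toList.drop 2)) = pvCr S.toList
  match h : S.toList with
  | [] => simp [pvCr_nil]
  | [a] => simp [pvCr_single]
  | [a, b] => simp [pvCr_pair]
  | a :: b :: c :: rest =>
      rw [if_neg (by simp)]
      have := (pvLoopA_key (c :: rest)).1 a b 0
      simp only [List.drop, PySem.List.pyGetD_zero_cons]
      rw [show PySem.List.pyGetD (a :: b :: c :: rest) 1 ' ' = b by
        simp [PySem.List.pyGetD, PySem.List.pyGet?, PySem.List.pyIdx?]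
        rw [if_pos (by omega)]
        simp]
      rw [this]; omega
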